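-- pv_equiv track=rewrite | github.com/sayfddin/SI-XX-IN | sifo_hunter.py | calculate_account_year
-- ===== SOURCE A (Python) =====
-- def calculate_account_year(user_id):
--     """Estimate account creation year from user ID"""
--     try:
--         uid = int(user_id)
--         id_ranges = [
--             (1000000, 5000000, 2010), (5000000, 15000000, 2011),
--             (15000000, 50000000, 2012), (50000000, 150000000, 2013),
--             (150000000, 300000000, 2014), (300000000, 500000000, 2015),
--             (500000000, 800000000, 2016), (800000000, 1200000000, 2017),
--             (1200000000, 1700000000, 2018)
--         ]
--         for min_id, max_id, year in id_ranges:
--             if min_id <= uid <= max_id: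
--                 return year
--         return None
--     except:
--         return None
-- ===== SOURCE B (Python) =====
-- import bisect
--
-- _UPPERS = [5000000, 15000000, 50000000, 150000000, 300000000,
--            500000000, 800000000, 1200000000, 1700000000]
-- _YEARS = [2010, 2011, 2012, 2013, 2014, 2015, 2016, 2017, 2018]
--
--
-- def calculate_account_year(user_id):
--     """Estimate account creation year from user ID"""
--     try:
--         uid = int(user_id)
--     except Exception:
--         return None
--     if uid < 1000000:
--         return None
--     i = bisect.bisect_left(_UPPERS, uid)
--     return _YEARS[i] if i < len(_YEARS) else None
-- ===== Notes on version B (the rewrite author's own statement) =====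
-- stated objective: alternative
-- what changed: Replaces the linear first-match scan over nine (min,max,year) ranges with a single bisect_left binary search into a sorted table of upper bounds plus a parallel year table.
import Mathlib
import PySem

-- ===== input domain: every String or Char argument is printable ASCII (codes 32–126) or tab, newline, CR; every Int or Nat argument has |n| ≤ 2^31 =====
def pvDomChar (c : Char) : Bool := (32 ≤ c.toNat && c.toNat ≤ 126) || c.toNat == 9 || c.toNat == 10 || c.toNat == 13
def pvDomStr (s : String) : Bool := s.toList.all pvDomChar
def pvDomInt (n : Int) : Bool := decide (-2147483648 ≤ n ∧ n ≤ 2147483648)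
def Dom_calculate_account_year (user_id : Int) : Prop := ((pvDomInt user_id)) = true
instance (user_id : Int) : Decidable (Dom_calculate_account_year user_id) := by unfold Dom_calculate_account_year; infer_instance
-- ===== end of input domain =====

-- B replaces A's linear first-match scan over nine (min,max,year) ranges by a single
-- bisect_left binary search into a sorted table of upper bounds (objective: alternative).

-- ===== PORT A =====
-- try: int(user_id) never raises on an Int argument, so the except branch is unreachable here.
def pvIdRanges : List (Int × Int × Int) :=
  [(1000000, 5000000, 2010), (5000000, 15000000, 2011),
   (15000000, 50000000, 2012), (50000000, 150000000, 2013),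
   (150000000, 300000000, 2014), (300000000, 500000000, 2015),
   (500000000, 800000000, 2016), (800000000, 1200000000, 2017),
   (1200000000, 1700000000, 2018)]

def pvScan (uid : Int) : List (Int × Int × Int) → Option Int
  | [] => none
  | (mn, mx, yr) :: rest => if mn ≤ uid ∧ uid ≤ mx then some yr else pvScan uid rest

def calculate_account_year (user_id : Int) : Option Int :=
  pvScan user_id pvIdRanges

-- ===== PORT B =====
def pvUppers : List Int :=
  [5000000, 15000000, 50000000, 150000000, 300000000,
   500000000, 800000000, 1200000000, 1700000000]

def pvYears : List Int := [2010, 2011, 2012, 2013, 2014, 2015, 2016, 2017, 2018]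

def calculate_account_year_alt (user_id : Int) : Option Int :=
  if user_id < 1000000 then none
  else
    let i := PySem.List.bisectLeft pvUppers user_id
    if i < pvYears.length then some (pvYears.getD i 0) else none

-- ===== PRECONDITION & SPEC =====
def Spec_calculate_account_year (user_id : Int) (out : Option Int) : Prop := out = calculate_account_year_alt user_id
instance (user_id : Int) (out : Option Int) : Decidable (Spec_calculate_account_year user_id out) := by unfold Spec_calculate_account_year; infer_instance

-- ===== CLAIM (what is proved, stated in full; the proofs are below) =====
def Claim_equal_calculate_account_year : Prop := ∀ (user_id : Int), Dom_calculate_account_year user_id → Spec_calculate_account_year user_id (calculate_account_year user_id)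

-- ===== LEMMAS AND PROOFS =====

-- bisect_left on the literal upper-bound table: value characterised by the spec lemma
theorem bl_eq (x : Int) (k : Nat) (hk : k ≤ pvUppers.length)
    (hlow : ∀ (j : Nat) (hj : j < pvUppers.length), j < k → pvUppers[j] < x)
    (hhigh : ∀ (j : Nat) (hj : j < pvUppers.length), k ≤ j → x ≤ pvUppers[j]) :
    PySem.List.bisectLeft pvUppers x = k := by
  have hs : List.Pairwise (fun a b => a ≤ b) pvUppers := by decide
  obtain ⟨h1, h2, h3⟩ := PySem.List.bisectLeft_spec pvUppers x hs
  set i := PySem.List.bisectLeft pvUppers x with hi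
  rcases lt_trichotomy i k with h | h | h
  · have hik : i < pvUppers.length := lt_of_lt_of_le h hk
    have := hlow i hik h
    have := h3 i hik (le_refl i)
    omega
  · exact h
  · have hk9 : k < pvUppers.length := lt_of_lt_of_le h h1
    have := h2 k hk9 h
    have := hhigh k hk9 (le_refl k)
    omega

-- ===== VERDICT (by name: the statement is the Claim_ definition above) =====
set_option maxHeartbeats 1000000 in
theorem calculate_account_year_spec : Claim_equal_calculate_account_year := by
  intro uid _
  unfold Spec_calculate_account_year calculate_account_year calculate_account_year_alt
  by_cases h0 : uid < 1000000
  · rw [if_pos h0]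
    simp only [pvScan, pvIdRanges]
    split_ifs <;> first | rfl | (exfalso; omega)
  · rw [if_neg h0]
    by_cases h1 : uid ≤ 5000000
    · have hb : PySem.List.bisectLeft pvUppers uid = 0 := by
        apply bl_eq
        · simp [pvUppers]
        · intro j hj hjk
          simp only [pvUppers, List.length_cons, List.length_nil] at hj
          interval_cases j <;> simp [pvUppers] <;> omega
        · intro j hj hjk
          simp only [pvUppers, List.length_cons, List.length_nil] at hj
          interval_cases j <;> simp [pvUppers] <;> omega
      rw [hb]
      show pvScan uid pvIdRanges = some 2010
      simp only [pvScan, pvIdRanges]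
      split_ifs <;> first | rfl | (exfalso; omega)
    ·
      by_cases h2 : uid ≤ 15000000
      · have hb : PySem.List.bisectLeft pvUppers uid = 1 := by
          apply bl_eq
          · simp [pvUppers]
          · intro j hj hjk
            simp only [pvUppers, List.length_cons, List.length_nil] at hj
            interval_cases j <;> simp [pvUppers] <;> omega
          · intro j hj hjk
            simp only [pvUppers, List.length_cons, List.length_nil] at hj
            interval_cases j <;> simp [pvUppers] <;> omega
        rw [hb]
        show pvScan uid pvIdRanges = some 2011
        simp only [pvScan, pvIdRanges]
        split_ifs <;> first | rfl | (exfalso; omega)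
      ·
        by_cases h3 : uid ≤ 50000000
        · have hb : PySem.List.bisectLeft pvUppers uid = 2 := by
            apply bl_eq
            · simp [pvUppers]
            · intro j hj hjk
              simp only [pvUppers, List.length_cons, List.length_nil] at hj
              interval_cases j <;> simp [pvUppers] <;> omega
            · intro j hj hjk
              simp only [pvUppers, List.length_cons, List.length_nil] at hj
              interval_cases j <;> simp [pvUppers] <;> omega
          clear h1
          rw [hb]
          show pvScan uid pvIdRanges = some 2012
          simp only [pvScan, pvIdRanges]
          split_ifs <;> first | rfl | (exfalso; omega)
        ·
          by_cases h4 : uid ≤ 150000000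
          · have hb : PySem.List.bisectLeft pvUppers uid = 3 := by
              apply bl_eq
              · simp [pvUppers]
              · intro j hj hjk
                simp only [pvUppers, List.length_cons, List.length_nil] at hj
                interval_cases j <;> simp [pvUppers] <;> omega
              · intro j hj hjk
                simp only [pvUppers, List.length_cons, List.length_nil] at hj
                interval_cases j <;> simp [pvUppers] <;> omega
            clear h1 h2
            rw [hb]
            show pvScan uid pvIdRanges = some 2013
            simp only [pvScan, pvIdRanges]
            split_ifs <;> first | rfl | (exfalso; omega)
          ·
            by_cases h5 : uid ≤ 300000000
            · have hb : PySem.List.bisectLeft pvUppers uid = 4 := by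
                apply bl_eq
                · simp [pvUppers]
                · intro j hj hjk
                  simp only [pvUppers, List.length_cons, List.length_nil] at hj
                  interval_cases j <;> simp [pvUppers] <;> omega
                · intro j hj hjk
                  simp only [pvUppers, List.length_cons, List.length_nil] at hj
                  interval_cases j <;> simp [pvUppers] <;> omega
              clear h1 h2 h3
              rw [hb]
              show pvScan uid pvIdRanges = some 2014
              simp only [pvScan, pvIdRanges]
              split_ifs <;> first | rfl | (exfalso; omega)
            ·
              by_cases h6 : uid ≤ 500000000
              · have hb : PySem.List.bisectLeft pvUppers uid = 5 := by
                  apply bl_eq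
                  · simp [pvUppers]
                  · intro j hj hjk
                    simp only [pvUppers, List.length_cons, List.length_nil] at hj
                    interval_cases j <;> simp [pvUppers] <;> omega
                  · intro j hj hjk
                    simp only [pvUppers, List.length_cons, List.length_nil] at hj
                    interval_cases j <;> simp [pvUppers] <;> omega
                clear h1 h2 h3 h4
                rw [hb]
                show pvScan uid pvIdRanges = some 2015
                simp only [pvScan, pvIdRanges]
                split_ifs <;> first | rfl | (exfalso; omega)
              ·
                by_cases h7 : uid ≤ 800000000
                · have hb : PySem.List.bisectLeft pvUppers uid = 6 := by
                    apply bl_eq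
                    · simp [pvUppers]
                    · intro j hj hjk
                      simp only [pvUppers, List.length_cons, List.length_nil] at hj
                      interval_cases j <;> simp [pvUppers] <;> omega
                    · intro j hj hjk
                      simp only [pvUppers, List.length_cons, List.length_nil] at hj
                      interval_cases j <;> simp [pvUppers] <;> omega
                  clear h1 h2 h3 h4 h5
                  rw [hb]
                  show pvScan uid pvIdRanges = some 2016
                  simp only [pvScan, pvIdRanges]
                  split_ifs <;> first | rfl | (exfalso; omega)
                ·
                  by_cases h8 : uid ≤ 1200000000
                  · have hb : PySem.List.bisectLeft pvUppers uid = 7 := by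
                      apply bl_eq
                      · simp [pvUppers]
                      · intro j hj hjk
                        simp only [pvUppers, List.length_cons, List.length_nil] at hj
                        interval_cases j <;> simp [pvUppers] <;> omega
                      · intro j hj hjk
                        simp only [pvUppers, List.length_cons, List.length_nil] at hj
                        interval_cases j <;> simp [pvUppers] <;> omega
                    clear h1 h2 h3 h4 h5 h6
                    rw [hb]
                    show pvScan uid pvIdRanges = some 2017
                    simp only [pvScan, pvIdRanges]
                    split_ifs <;> first | rfl | (exfalso; omega)
                  ·
                    by_cases h9 : uid ≤ 1700000000
                    · have hb : PySem.List.bisectLeft pvUppers uid = 8 := by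
                        apply bl_eq
                        · simp [pvUppers]
                        · intro j hj hjk
                          simp only [pvUppers, List.length_cons, List.length_nil] at hj
                          interval_cases j <;> simp [pvUppers] <;> omega
                        · intro j hj hjk
                          simp only [pvUppers, List.length_cons, List.length_nil] at hj
                          interval_cases j <;> simp [pvUppers] <;> omega
                      clear h1 h2 h3 h4 h5 h6 h7
                      rw [hb]
                      show pvScan uid pvIdRanges = some 2018
                      simp only [pvScan, pvIdRanges]
                      split_ifs <;> first | rfl | (exfalso; omega)
                    ·
                      have hb : PySem.List.bisectLeft pvUppers uid = 9 := by
                        apply bl_eq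
                        · simp [pvUppers]
                        · intro j hj hjk
                          simp only [pvUppers, List.length_cons, List.length_nil] at hj
                          interval_cases j <;> simp [pvUppers] <;> omega
                        · intro j hj hjk
                          simp only [pvUppers, List.length_cons, List.length_nil] at hj
                          omega
                      clear h1 h2 h3 h4 h5 h6 h7 h8
                      rw [hb]
                      show pvScan uid pvIdRanges = none
                      simp only [pvScan, pvIdRanges]
                      split_ifs <;> first | rfl | (exfalso; omega)
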